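-- pv_equiv track=rewrite | github.com/codingchild2424/2026-lecture-algorithm | lectures/week07/2_lab/examples/review_problems.py | problem2_solution
-- ===== SOURCE A (Python) =====
-- def problem2_solution(arr):
--     """Merge Sort 풀이.
--
--     시간 복잡도: O(n log n)
--     공간 복잡도: O(n)
--     """
--     merge_count = [0]  # 리스트로 감싸서 내부 함수에서 수정 가능하게
--
--     def merge_sort(a):
--         if len(a) <= 1:
--             return a
--
--         mid = len(a) // 2
--         left = merge_sort(a[:mid])
--         right = merge_sort(a[mid:])
--
--         return merge(left, right)
--
--     def merge(left, right):
--         merge_count[0] += 1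
--         result = []
--         i = j = 0
--
--         while i < len(left) and j < len(right):
--             if left[i] <= right[j]:  # <= for stability
--                 result.append(left[i])
--                 i += 1
--             else:
--                 result.append(right[j])
--                 j += 1
--
--         result.extend(left[i:])
--         result.extend(right[j:])
--         return result
--
--     sorted_arr = merge_sort(arr)
--     return sorted_arr, merge_count[0]
-- ===== SOURCE B (Python) =====
-- def problem2_solution(arr):
--     """sorted() for the array; merge count in closed form: a merge-sort of n
--     elements performs exactly max(0, n-1) merges."""
--     return sorted(arr), max(0, len(arr) - 1)
-- ===== Notes on version B (the rewrite author's own statement) =====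
-- stated objective: faster
-- what changed: Replaces the hand-written recursive merge sort plus mutable merge counter with the built-in sorted() and the closed form max(0, n-1) for the number of merge operations.
import Mathlib
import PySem

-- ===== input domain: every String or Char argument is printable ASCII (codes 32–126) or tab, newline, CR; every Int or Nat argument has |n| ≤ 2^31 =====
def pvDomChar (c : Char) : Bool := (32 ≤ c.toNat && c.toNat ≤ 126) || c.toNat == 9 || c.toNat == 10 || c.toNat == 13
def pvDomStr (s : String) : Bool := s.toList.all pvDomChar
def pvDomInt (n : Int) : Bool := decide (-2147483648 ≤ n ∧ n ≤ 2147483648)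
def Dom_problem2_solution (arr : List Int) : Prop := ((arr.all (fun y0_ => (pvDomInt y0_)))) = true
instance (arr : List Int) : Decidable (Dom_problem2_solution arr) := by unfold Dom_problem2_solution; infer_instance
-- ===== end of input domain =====

-- B replaces the hand-written recursive merge sort with the library stable sort and the
-- closed form max(0, n-1) for the merge count (objective: faster by a constant factor).


-- ===== PORT A =====
-- the inner 'merge': the while loop over i, j plus the two extends, as structural recursion
def pvMergeA : List Int → List Int → List Int
  | [], r => r
  | x :: l, [] => x :: l
  | x :: l, y :: r =>
    if x ≤ y then x :: pvMergeA l (y :: r)      -- <= for stability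
    else y :: pvMergeA (x :: l) r

-- 'merge_sort' with the mutable merge_count threaded through as the second component;
-- a[:mid] = take mid and a[mid:] = drop mid are exact since mid = len//2 ≥ 0
def pvMergeSortA (a : List Int) : List Int × Int :=
  if _h : a.length ≤ 1 then (a, 0)
  else
    let mid := a.length / 2
    let left := pvMergeSortA (a.take mid)
    let right := pvMergeSortA (a.drop mid)
    (pvMergeA left.1 right.1, left.2 + right.2 + 1)   -- merge_count[0] += 1 at each merge call
termination_by a.length
decreasing_by
  · simp; omega
  · simp; omega

def problem2_solution (arr : List Int) : List Int × Int := pvMergeSortA arr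

-- ===== PORT B =====
def problem2_solution_alt (arr : List Int) : List Int × Int :=
  (PySem.List.sorted arr (fun x => x) false, max 0 ((arr.length : Int) - 1))

-- ===== PRECONDITION & SPEC =====
def Spec_problem2_solution (arr : List Int) (out : List Int × Int) : Prop := out = problem2_solution_alt arr
instance (arr : List Int) (out : List Int × Int) : Decidable (Spec_problem2_solution arr out) := by unfold Spec_problem2_solution; infer_instance

-- ===== CLAIM (what is proved, stated in full; the proofs are below) =====
def Claim_equal_problem2_solution : Prop := ∀ (arr : List Int), Dom_problem2_solution arr → Spec_problem2_solution arr (problem2_solution arr)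

-- ===== LEMMAS AND PROOFS =====
theorem pvMergeA_perm : ∀ (l r : List Int), (pvMergeA l r).Perm (l ++ r)
  | [], r => by simp [pvMergeA]
  | x :: l, [] => by simp [pvMergeA]
  | x :: l, y :: r => by
    by_cases h : x ≤ y
    · simpa [pvMergeA, h] using (pvMergeA_perm l (y :: r)).cons x
    · simp only [pvMergeA, h, if_false]
      exact ((pvMergeA_perm (x :: l) r).cons y).trans List.perm_middle.symm
termination_by l r => l.length + r.length

theorem pvMergeA_pairwise : ∀ (l r : List Int), l.Pairwise (· ≤ ·) → r.Pairwise (· ≤ ·) →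
    (pvMergeA l r).Pairwise (· ≤ ·)
  | [], r => by intro _ hr; simpa [pvMergeA] using hr
  | x :: l, [] => by intro hl _; simpa [pvMergeA] using hl
  | x :: l, y :: r => by
    intro hl hr
    by_cases h : x ≤ y
    · rcases List.pairwise_cons.1 hl with ⟨hx, hl'⟩
      simp only [pvMergeA, h, if_true]
      refine List.pairwise_cons.2 ⟨?_, pvMergeA_pairwise l (y :: r) hl' hr⟩
      intro z hz
      have hz' : z ∈ l ++ y :: r := (pvMergeA_perm l (y :: r)).mem_iff.1 hz
      rcases List.mem_append.1 hz' with hm | hm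
      · exact hx z hm
      · rcases List.mem_cons.1 hm with hm | hm
        · exact hm ▸ h
        · exact le_trans h ((List.pairwise_cons.1 hr).1 z hm)
    · rcases List.pairwise_cons.1 hr with ⟨hy, hr'⟩
      simp only [pvMergeA, h, if_false]
      refine List.pairwise_cons.2 ⟨?_, pvMergeA_pairwise (x :: l) r hl hr'⟩
      intro z hz
      have hyx : y ≤ x := (not_le.mp h).le
      have hz' : z ∈ (x :: l) ++ r := (pvMergeA_perm (x :: l) r).mem_iff.1 hz
      rcases List.mem_append.1 hz' with hm | hm
      · rcases List.mem_cons.1 hm with hm | hm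
        · exact hm ▸ hyx
        · exact le_trans hyx ((List.pairwise_cons.1 hl).1 z hm)
      · exact hy z hm
termination_by l r => l.length + r.length

theorem pvMergeSortA_spec (a : List Int) :
    (pvMergeSortA a).1.Perm a ∧ (pvMergeSortA a).1.Pairwise (· ≤ ·) ∧
      (pvMergeSortA a).2 = max 0 ((a.length : Int) - 1) := by
  by_cases h : a.length ≤ 1
  · rw [pvMergeSortA, dif_pos h]
    refine ⟨List.Perm.refl a, ?_, ?_⟩
    · rcases a with _ | ⟨x, _ | ⟨y, t⟩⟩ <;> simp_all
    · rcases a with _ | ⟨x, _ | ⟨y, t⟩⟩ <;> simp_all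
  · obtain ⟨lp, ls, lc⟩ := pvMergeSortA_spec (a.take (a.length / 2))
    obtain ⟨rp, rs, rc⟩ := pvMergeSortA_spec (a.drop (a.length / 2))
    rw [pvMergeSortA, dif_neg h]
    refine ⟨?_, pvMergeA_pairwise _ _ ls rs, ?_⟩
    · exact (pvMergeA_perm _ _).trans ((lp.append rp).trans (by rw [List.take_append_drop]))
    · show (pvMergeSortA (a.take (a.length / 2))).2 + (pvMergeSortA (a.drop (a.length / 2))).2 + 1
        = max 0 ((a.length : Int) - 1)
      rw [lc, rc]
      simp only [List.length_take, List.length_drop]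
      omega
termination_by a.length
decreasing_by
  · simp; omega
  · simp; omega

-- ===== VERDICT (by name: the statement is the Claim_ definition above) =====
theorem problem2_solution_spec : Claim_equal_problem2_solution := by
  intro arr _
  unfold Spec_problem2_solution problem2_solution problem2_solution_alt
  obtain ⟨hp, hs, hc⟩ := pvMergeSortA_spec arr
  exact Prod.ext ((PySem.List.sorted_id_eq_of_perm_of_pairwise _ _ hp hs).symm).symm hc.symm |>.symm
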